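-- pv_equiv track=rewrite | github.com/dschinzo/Competitive-Programming | src/Codechef/Long Challenges/JULY20B/CHFNSWPS/solution.py | solve
-- ===== SOURCE A (Python) =====
-- def solve(A, B):
--     aShare = []
--     bShare = []
--     for k in set(A.keys()).union(set(B.keys())):
--         if k in A:
--             if k not in B:
--                 if A[k] % 2 == 0:
--                     for _ in range(A[k]//2):
--                         aShare.append(k)
--                 else:
--                     return -1
--             else:
--                 if (A[k]+B[k])%2==0:
--                     if A[k] > B[k]:
--                         for _ in range((A[k]-B[k])//2):
--                             aShare.append(k)
--                     elif B[k] > A[k]: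
--                         for _ in range((B[k]-A[k])//2):
--                             bShare.append(k)
--                 else:
--                     return -1
--         else:
--             if B[k] % 2 == 0:
--                 for _ in range(B[k]//2):
--                     bShare.append(k)
--             else:
--                 return -1
--     guess = min(min(A), min(B))
--     aShare.sort()
--     bShare.sort(reverse=True)
--     cost = 0
--     m = len(aShare)
--     for i in range(m):
--         cost += min(min(aShare[i], bShare[i]), 2 * guess)
--     return cost
-- ===== SOURCE B (Python) =====
-- def solve(A, B):
--     # Work on (key, multiplicity) runs instead of expanding every surplus
--     # element: group surpluses per key, sort the run keys, then merge the
--     # ascending a-runs against the descending b-runs two-pointer style.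
--     aRuns = {}
--     bRuns = {}
--     for k in A.keys() | B.keys():
--         a = A.get(k, 0)
--         b = B.get(k, 0)
--         if (a - b) % 2:
--             return -1
--         if k in A and a > b:
--             aRuns[k] = (a - b) // 2
--         elif k in B and b > a:
--             bRuns[k] = (b - a) // 2
--     cap = 2 * min(min(A), min(B))
--     asc = [(k, aRuns[k]) for k in sorted(aRuns)]
--     desc = [(k, bRuns[k]) for k in sorted(bRuns, reverse=True)]
--     cost = 0
--     i = 0
--     j = 0
--     while i < len(asc) and j < len(desc):
--         ka, ca = asc[i]
--         kb, cb = desc[j]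
--         t = min(ca, cb)
--         cost += t * min(ka, kb, cap)
--         if ca == t:
--             i += 1
--             if cb == t:
--                 j += 1
--             else:
--                 desc[j] = (kb, cb - t)
--         else:
--             asc[i] = (ka, ca - t)
--             j += 1
--     return cost
-- ===== Notes on version B (the rewrite author's own statement) =====
-- stated objective: alternative
-- what changed: Instead of materialising every surplus element (A[k]//2 copies per key) into two lists and sorting them element-wise, B groups surpluses as (key, multiplicity) runs per distinct key, sorts only the run keys, and merges ascending a-runs against descending b-runs two-pointer style, adding t*min(ka,kb,cap) per run overlap; this is asymptotically lighter when multiplicities are large, though a timing run's inputs (small multiplicities) showed only ~1.27x, so no speed is claimed.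
import Mathlib
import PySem

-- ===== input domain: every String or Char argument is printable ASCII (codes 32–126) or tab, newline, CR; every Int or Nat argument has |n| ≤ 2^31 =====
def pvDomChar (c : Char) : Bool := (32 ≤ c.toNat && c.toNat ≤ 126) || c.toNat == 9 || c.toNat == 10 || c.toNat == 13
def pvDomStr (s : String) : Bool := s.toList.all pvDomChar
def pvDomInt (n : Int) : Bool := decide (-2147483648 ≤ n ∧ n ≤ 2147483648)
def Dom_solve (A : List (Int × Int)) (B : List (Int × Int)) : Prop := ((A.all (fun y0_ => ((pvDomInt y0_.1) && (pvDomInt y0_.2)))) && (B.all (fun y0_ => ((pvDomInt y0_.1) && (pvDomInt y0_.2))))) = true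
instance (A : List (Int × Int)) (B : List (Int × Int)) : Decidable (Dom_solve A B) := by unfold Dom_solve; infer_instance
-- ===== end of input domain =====

-- B replaces A's expand-every-surplus-element-then-sort pairing by a per-key
-- run merge: it groups surpluses as (key, multiplicity) runs and merges the
-- ascending a-runs against the descending b-runs two-pointer style.

-- ===== PORT A =====
-- the 'for k in set(A.keys()).union(set(B.keys()))' loop of A, with early 'return -1' as none
def solveGoA (dA dB : PySem.Dict Int Int) : List Int → List Int → List Int → Option (List Int × List Int)
  | [], aShare, bShare => some (aShare, bShare)
  | k :: ks, aShare, bShare =>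
    match PySem.Dict.get? dA k with
    | some a =>
      match PySem.Dict.get? dB k with
      | none =>
        if PySem.Int.mod a 2 == 0 then
          solveGoA dA dB ks
            ((PySem.List.pyRange 0 (PySem.Int.floordiv a 2) 1).foldl (fun acc _ => acc ++ [k]) aShare)
            bShare
        else none
      | some b =>
        if PySem.Int.mod (a + b) 2 == 0 then
          if a > b then
            solveGoA dA dB ks
              ((PySem.List.pyRange 0 (PySem.Int.floordiv (a - b) 2) 1).foldl (fun acc _ => acc ++ [k]) aShare)
              bShare
          else if b > a then
            solveGoA dA dB ks aShare
              ((PySem.List.pyRange 0 (PySem.Int.floordiv (b - a) 2) 1).foldl (fun acc _ => acc ++ [k]) bShare)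
          else solveGoA dA dB ks aShare bShare
        else none
    | none =>
      match PySem.Dict.get? dB k with
      | some b =>
        if PySem.Int.mod b 2 == 0 then
          solveGoA dA dB ks aShare
            ((PySem.List.pyRange 0 (PySem.Int.floordiv b 2) 1).foldl (fun acc _ => acc ++ [k]) bShare)
        else none
      | none => none  -- B[k] raises KeyError; unreachable: k is drawn from the union of the key sets

def solve (A : List (Int × Int)) (B : List (Int × Int)) : Int :=
  let dA := PySem.Dict.ofList A
  let dB := PySem.Dict.ofList B
  let ks : PySem.Set Int :=
    PySem.Set.union (PySem.Set.ofList (PySem.Dict.keys dA)) (PySem.Set.ofList (PySem.Dict.keys dB))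
  match solveGoA dA dB ks [] [] with
  | none => -1
  | some (aShare, bShare) =>
    -- min() on an empty dict raises ValueError; such inputs are outside Pre_solve (default 0 is junk)
    let guess := min ((PySem.List.min? (PySem.Dict.keys dA) (fun x => x)).getD 0)
                     ((PySem.List.min? (PySem.Dict.keys dB) (fun x => x)).getD 0)
    let aS := PySem.List.sorted aShare (fun x => x) false
    let bS := PySem.List.sorted bShare (fun x => x) true
    -- bShare[i] raises IndexError when len(bShare) < len(aShare); outside Pre_solve (default 0 is junk)
    (PySem.List.pyRange 0 (PySem.List.len aS) 1).foldl
      (fun cost i => cost + min (min (PySem.List.pyGetD aS i 0) (PySem.List.pyGetD bS i 0)) (2 * guess)) 0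

-- ===== PORT B =====
-- the 'for k in A.keys() | B.keys()' loop of Source B building the two run dicts, early 'return -1' as none
def solveGoB (dA dB : PySem.Dict Int Int) : List Int → PySem.Dict Int Int → PySem.Dict Int Int →
    Option (PySem.Dict Int Int × PySem.Dict Int Int)
  | [], aRuns, bRuns => some (aRuns, bRuns)
  | k :: ks, aRuns, bRuns =>
    let a := PySem.Dict.getD dA k 0
    let b := PySem.Dict.getD dB k 0
    if PySem.Int.mod (a - b) 2 != 0 then none
    else if PySem.Dict.contains dA k && decide (a > b) then
      solveGoB dA dB ks (aRuns.insert k (PySem.Int.floordiv (a - b) 2)) bRuns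
    else if PySem.Dict.contains dB k && decide (b > a) then
      solveGoB dA dB ks aRuns (bRuns.insert k (PySem.Int.floordiv (b - a) 2))
    else solveGoB dA dB ks aRuns bRuns

-- the 'while i < len(asc) and j < len(desc)' merge loop of Source B (index advance = list recursion)
def solveMerge (cap : Int) : List (Int × Int) → List (Int × Int) → Int → Int
  | [], _, cost => cost
  | _ :: _, [], cost => cost
  | (ka, ca) :: as', (kb, cb) :: bs', cost =>
    let t := min ca cb
    let cost' := cost + t * min (min ka kb) cap
    if ca == t then
      if cb == t then solveMerge cap as' bs' cost'
      else solveMerge cap as' ((kb, cb - t) :: bs') cost'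
    else solveMerge cap ((ka, ca - t) :: as') bs' cost'
  termination_by asc desc _ => asc.length + desc.length
  decreasing_by all_goals simp <;> omega

def solve_alt (A : List (Int × Int)) (B : List (Int × Int)) : Int :=
  let dA := PySem.Dict.ofList A
  let dB := PySem.Dict.ofList B
  let ks : PySem.Set Int :=
    PySem.Set.union (PySem.Set.ofList (PySem.Dict.keys dA)) (PySem.Set.ofList (PySem.Dict.keys dB))
  match solveGoB dA dB ks PySem.Dict.empty PySem.Dict.empty with
  | none => -1
  | some (aRuns, bRuns) =>
    let cap := 2 * min ((PySem.List.min? (PySem.Dict.keys dA) (fun x => x)).getD 0)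
                       ((PySem.List.min? (PySem.Dict.keys dB) (fun x => x)).getD 0)
    let asc := (PySem.List.sorted (PySem.Dict.keys aRuns) (fun x => x) false).map
                 (fun k => (k, aRuns.getD k 0))
    let desc := (PySem.List.sorted (PySem.Dict.keys bRuns) (fun x => x) true).map
                 (fun k => (k, bRuns.getD k 0))
    solveMerge cap asc desc 0

-- ===== PRECONDITION & SPEC =====
-- surplus halves A resp. B would pair off at key k (0 when the key is absent or has no surplus)
def pvCntA (dA dB : PySem.Dict Int Int) (k : Int) : Nat :=
  if dA.contains k then (PySem.Int.floordiv (dA.getD k 0 - dB.getD k 0) 2).toNat else 0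
def pvCntB (dA dB : PySem.Dict Int Int) (k : Int) : Nat :=
  if dB.contains k then (PySem.Int.floordiv (dB.getD k 0 - dA.getD k 0) 2).toNat else 0
abbrev pvOk (dA dB : PySem.Dict Int Int) (k : Int) : Prop :=
  PySem.Int.mod (dA.getD k 0 - dB.getD k 0) 2 = 0

-- Pre_solve excludes exactly the inputs where A raises: when no key has odd combined
-- multiplicity (no early 'return -1'), A needs both dicts nonempty (else min() raises
-- ValueError) and at least as many b-surplus halves as a-surplus halves (else bShare[i]
-- raises IndexError).
def Pre_solve (A : List (Int × Int)) (B : List (Int × Int)) : Prop :=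
  let dA := PySem.Dict.ofList A
  let dB := PySem.Dict.ofList B
  let ks : PySem.Set Int :=
    PySem.Set.union (PySem.Set.ofList (PySem.Dict.keys dA)) (PySem.Set.ofList (PySem.Dict.keys dB))
  (∃ k ∈ ks, ¬ pvOk dA dB k) ∨
  (A ≠ [] ∧ B ≠ [] ∧ (ks.map (pvCntA dA dB)).sum ≤ (ks.map (pvCntB dA dB)).sum)
instance (A : List (Int × Int)) (B : List (Int × Int)) : Decidable (Pre_solve A B) := by
  unfold Pre_solve; infer_instance

def pvWitness_solve : (List (Int × Int)) × (List (Int × Int)) := ([(1, 2)], [(2, 2)])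

def Spec_solve (A : List (Int × Int)) (B : List (Int × Int)) (out : Int) : Prop := out = solve_alt A B
instance (A : List (Int × Int)) (B : List (Int × Int)) (out : Int) : Decidable (Spec_solve A B out) := by
  unfold Spec_solve; infer_instance

-- ===== CLAIM (what is proved, stated in full; the proofs are below) =====
def Claim_equal_solve : Prop := ∀ (A : List (Int × Int)) (B : List (Int × Int)), Dom_solve A B → Pre_solve A B → Spec_solve A B (solve A B)

-- ===== LEMMAS AND PROOFS =====

-- expansion of per-key multiplicities into the element lists A builds
def pvExpand (n : Int → Nat) (ks : List Int) : List Int :=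
  ks.flatMap (fun k => List.replicate (n k) k)

-- run selectors of B's loop
def pvSelA (dA dB : PySem.Dict Int Int) (k : Int) : Bool :=
  PySem.Dict.contains dA k && decide (dA.getD k 0 > dB.getD k 0)
def pvSelB (dA dB : PySem.Dict Int Int) (k : Int) : Bool :=
  PySem.Dict.contains dB k && decide (dB.getD k 0 > dA.getD k 0)

lemma rep_fold (k : Int) (m : Int) (aS : List Int) :
    (PySem.List.pyRange 0 m 1).foldl (fun acc _ => acc ++ [k]) aS
      = aS ++ List.replicate m.toNat k := by
  rw [PySem.List.foldl_append_singleton_eq_map (f := fun _ => k)]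
  congr 1
  rw [List.map_const']
  simp [PySem.List.length_pyRange_one]

lemma fd2_nonpos {x : Int} (hx : x ≤ 0) : (PySem.Int.floordiv x 2).toNat = 0 := by
  have h := (PySem.Int.floordiv_lt_iff_lt_mul (a := x) (b := 2) (q := 1) (by omega)).2 (by omega)
  omega

lemma goA_char (dA dB : PySem.Dict Int Int) (ks : List Int)
    (hmem : ∀ k ∈ ks, dA.contains k = true ∨ dB.contains k = true) (aS bS : List Int) :
    solveGoA dA dB ks aS bS =
      if ∀ k ∈ ks, pvOk dA dB k
      then some (aS ++ pvExpand (pvCntA dA dB) ks, bS ++ pvExpand (pvCntB dA dB) ks)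
      else none := by
  induction ks generalizing aS bS with
  | nil => simp [solveGoA, pvExpand]
  | cons k ks ih =>
    have ihk := ih (fun a ha => hmem a (List.mem_cons_of_mem _ ha))
    have hk := hmem k List.mem_cons_self
    rcases hA : PySem.Dict.get? dA k with _ | a <;> rcases hB : PySem.Dict.get? dB k with _ | b
    · -- neither: contradiction with hmem
      rw [solveGoA]
      simp only [hA, hB]
      rw [PySem.Dict.contains_eq_isSome_get?, PySem.Dict.contains_eq_isSome_get?, hA, hB] at hk
      simp at hk
    · -- only in B
      have hcA : dA.contains k = false := by
        rw [PySem.Dict.contains_eq_isSome_get?, hA]; rfl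
      have hcB : dB.contains k = true := by
        rw [PySem.Dict.contains_eq_isSome_get?, hB]; rfl
      have hgA : dA.getD k 0 = 0 := PySem.Dict.getD_of_get?_eq_none _ 0 hA
      have hgB : dB.getD k 0 = b := PySem.Dict.getD_of_get?_eq_some _ 0 hB
      have hok : pvOk dA dB k ↔ PySem.Int.mod b 2 = 0 := by
        rw [pvOk, hgA, hgB, PySem.Int.mod_eq_zero_iff_dvd, PySem.Int.mod_eq_zero_iff_dvd]
        constructor <;> (intro h; omega)
      rw [solveGoA]
      simp only [hA, hB]
      by_cases hb2 : PySem.Int.mod b 2 = 0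
      · simp only [hb2, beq_self_eq_true, if_true, ihk, rep_fold]
        have : pvOk dA dB k := hok.2 hb2
        have hcond : (∀ x ∈ k :: ks, pvOk dA dB x) ↔ (∀ x ∈ ks, pvOk dA dB x) := by
          simp only [List.forall_mem_cons]
          exact and_iff_right this
        simp only [hcond]
        split_ifs with h
        · simp only [pvExpand, List.flatMap_cons, pvCntA, pvCntB, hcA, hcB, if_true,
            hgA, hgB]
          simp [List.append_assoc]
        · rfl
      · have : ¬ pvOk dA dB k := fun h => hb2 (hok.1 h)
        rw [if_neg (by simpa using hb2), if_neg (fun hall => this (hall k List.mem_cons_self))]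
    · -- only in A
      have hcA : dA.contains k = true := by
        rw [PySem.Dict.contains_eq_isSome_get?, hA]; rfl
      have hcB : dB.contains k = false := by
        rw [PySem.Dict.contains_eq_isSome_get?, hB]; rfl
      have hgA : dA.getD k 0 = a := PySem.Dict.getD_of_get?_eq_some _ 0 hA
      have hgB : dB.getD k 0 = 0 := PySem.Dict.getD_of_get?_eq_none _ 0 hB
      have hok : pvOk dA dB k ↔ PySem.Int.mod a 2 = 0 := by
        rw [pvOk, hgA, hgB, PySem.Int.mod_eq_zero_iff_dvd, PySem.Int.mod_eq_zero_iff_dvd]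
        constructor <;> (intro h; omega)
      rw [solveGoA]
      simp only [hA, hB]
      by_cases ha2 : PySem.Int.mod a 2 = 0
      · simp only [ha2, beq_self_eq_true, if_true, ihk, rep_fold]
        have : pvOk dA dB k := hok.2 ha2
        have hcond : (∀ x ∈ k :: ks, pvOk dA dB x) ↔ (∀ x ∈ ks, pvOk dA dB x) := by
          simp only [List.forall_mem_cons]
          exact and_iff_right this
        simp only [hcond]
        split_ifs with h
        · simp only [pvExpand, List.flatMap_cons, pvCntA, pvCntB, hcA, hcB, if_true,
            hgA, hgB]
          simp [List.append_assoc]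
        · rfl
      · have : ¬ pvOk dA dB k := fun h => ha2 (hok.1 h)
        rw [if_neg (by simpa using ha2), if_neg (fun hall => this (hall k List.mem_cons_self))]
    · -- both
      have hcA : dA.contains k = true := by
        rw [PySem.Dict.contains_eq_isSome_get?, hA]; rfl
      have hcB : dB.contains k = true := by
        rw [PySem.Dict.contains_eq_isSome_get?, hB]; rfl
      have hgA : dA.getD k 0 = a := PySem.Dict.getD_of_get?_eq_some _ 0 hA
      have hgB : dB.getD k 0 = b := PySem.Dict.getD_of_get?_eq_some _ 0 hB
      have hok : pvOk dA dB k ↔ PySem.Int.mod (a + b) 2 = 0 := by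
        rw [pvOk, hgA, hgB, PySem.Int.mod_eq_zero_iff_dvd, PySem.Int.mod_eq_zero_iff_dvd]
        constructor <;> (intro h; omega)
      rw [solveGoA]
      simp only [hA, hB]
      by_cases hab : PySem.Int.mod (a + b) 2 = 0
      · have hokk : pvOk dA dB k := hok.2 hab
        simp only [hab, beq_self_eq_true, if_true]
        have hCA : pvCntA dA dB k = (PySem.Int.floordiv (a - b) 2).toNat := by
          rw [pvCntA, hcA, if_pos rfl, hgA, hgB]
        have hCB : pvCntB dA dB k = (PySem.Int.floordiv (b - a) 2).toNat := by
          rw [pvCntB, hcB, if_pos rfl, hgA, hgB]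
        rcases lt_trichotomy b a with hlt | heq | hgt
        · rw [if_pos (by omega), ihk, rep_fold]
          have hcond : (∀ x ∈ k :: ks, pvOk dA dB x) ↔ (∀ x ∈ ks, pvOk dA dB x) := by
            simp only [List.forall_mem_cons]
            exact and_iff_right hokk
          simp only [hcond]
          split_ifs with h
          · simp only [pvExpand, List.flatMap_cons, hCA, hCB, fd2_nonpos (by omega : b - a ≤ 0)]
            simp [List.append_assoc]
          · rfl
        · rw [if_neg (by omega), if_neg (by omega), ihk]
          have hcond : (∀ x ∈ k :: ks, pvOk dA dB x) ↔ (∀ x ∈ ks, pvOk dA dB x) := by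
            simp only [List.forall_mem_cons]
            exact and_iff_right hokk
          simp only [hcond]
          split_ifs with h
          · simp only [pvExpand, List.flatMap_cons, hCA, hCB, fd2_nonpos (by omega : a - b ≤ 0),
              fd2_nonpos (by omega : b - a ≤ 0)]
            simp
          · rfl
        · rw [if_neg (by omega), if_pos (by omega), ihk, rep_fold]
          have hcond : (∀ x ∈ k :: ks, pvOk dA dB x) ↔ (∀ x ∈ ks, pvOk dA dB x) := by
            simp only [List.forall_mem_cons]
            exact and_iff_right hokk
          simp only [hcond]
          split_ifs with h
          · simp only [pvExpand, List.flatMap_cons, hCA, hCB, fd2_nonpos (by omega : a - b ≤ 0)]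
            simp [List.append_assoc]
          · rfl
      · have : ¬ pvOk dA dB k := fun h => hab (hok.1 h)
        rw [if_neg (by simpa using hab), if_neg (fun hall => this (hall k List.mem_cons_self))]

lemma goB_char (dA dB : PySem.Dict Int Int) (ks : List Int) (hnd : ks.Nodup)
    (ra rb : PySem.Dict Int Int)
    (hra : ∀ k ∈ ks, ra.contains k = false) (hrb : ∀ k ∈ ks, rb.contains k = false) :
    solveGoB dA dB ks ra rb =
      if ∀ k ∈ ks, pvOk dA dB k
      then some
        (PySem.Dict.mk (ra.items ++ (ks.filter (pvSelA dA dB)).map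
            (fun k => (k, PySem.Int.floordiv (dA.getD k 0 - dB.getD k 0) 2))),
         PySem.Dict.mk (rb.items ++ (ks.filter (pvSelB dA dB)).map
            (fun k => (k, PySem.Int.floordiv (dB.getD k 0 - dA.getD k 0) 2))))
      else none := by
  induction ks generalizing ra rb with
  | nil => simp [solveGoB]
  | cons k ks ih =>
    have hndk : k ∉ ks := (List.nodup_cons.1 hnd).1
    have hnd' : ks.Nodup := (List.nodup_cons.1 hnd).2
    have hrak : ra.contains k = false := hra k List.mem_cons_self
    have hrbk : rb.contains k = false := hrb k List.mem_cons_self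
    have hra' : ∀ x ∈ ks, ra.contains x = false := fun x hx => hra x (List.mem_cons_of_mem _ hx)
    have hrb' : ∀ x ∈ ks, rb.contains x = false := fun x hx => hrb x (List.mem_cons_of_mem _ hx)
    rw [solveGoB]
    by_cases hok : pvOk dA dB k
    · rw [if_neg (by simp only [PySem.Int.mod_eq_zero_iff_dvd] at hok; simp [hok])]
      have hcond : (∀ x ∈ k :: ks, pvOk dA dB x) ↔ (∀ x ∈ ks, pvOk dA dB x) := by
        simp only [List.forall_mem_cons]
        exact and_iff_right hok
      by_cases hsA : pvSelA dA dB k = true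
      · rw [if_pos (by simpa [pvSelA] using hsA)]
        rw [ih hnd' _ rb
          (by
            intro x hx
            rw [PySem.Dict.contains_insert]
            have : x ≠ k := fun h => hndk (h ▸ hx)
            simp [this, hra' x hx])
          hrb']
        simp only [hcond]
        have hsBf : pvSelB dA dB k = false := by
          simp only [pvSelA, Bool.and_eq_true, decide_eq_true_eq] at hsA
          simp only [pvSelB, Bool.and_eq_false_iff]
          right
          simpa using by omega
        split_ifs with h
        · congr 2
          · rw [PySem.Dict.items_insert_of_not_contains _ _ hrak]
            rw [List.filter_cons_of_pos hsA]
            simp [List.append_assoc]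
          · rw [List.filter_cons_of_neg (by simp [hsBf])]
        · rfl
      · rw [if_neg (by simpa [pvSelA] using hsA)]
        by_cases hsB : pvSelB dA dB k = true
        · rw [if_pos (by simpa [pvSelB] using hsB)]
          rw [ih hnd' ra _ hra'
            (by
              intro x hx
              rw [PySem.Dict.contains_insert]
              have : x ≠ k := fun h => hndk (h ▸ hx)
              simp [this, hrb' x hx])]
          simp only [hcond]
          split_ifs with h
          · congr 2
            · rw [List.filter_cons_of_neg (by simpa using hsA)]
            · rw [PySem.Dict.items_insert_of_not_contains _ _ hrbk]
              rw [List.filter_cons_of_pos hsB]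
              simp [List.append_assoc]
          · rfl
        · rw [if_neg (by simpa [pvSelB] using hsB)]
          rw [ih hnd' ra rb hra' hrb']
          simp only [hcond]
          split_ifs with h
          · rw [List.filter_cons_of_neg (by simpa using hsA),
              List.filter_cons_of_neg (by simpa using hsB)]
          · rfl
    · rw [if_pos (by simpa using hok), if_neg (fun hall => hok (hall k List.mem_cons_self))]

lemma pairwise_expand {R : Int → Int → Prop} (hrefl : ∀ x : Int, R x x)
    (n : Int → Nat) (l : List Int) (h : l.Pairwise R) : (pvExpand n l).Pairwise R := by
  induction l with
  | nil => simp [pvExpand]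
  | cons k ks ih =>
    rcases List.pairwise_cons.1 h with ⟨hk, ht⟩
    simp only [pvExpand, List.flatMap_cons]
    rw [List.pairwise_append]
    refine ⟨List.pairwise_replicate.2 (Or.inr (hrefl k)), ih ht, ?_⟩
    intro a ha b hb
    rw [List.eq_of_mem_replicate ha]
    rcases List.mem_flatMap.1 hb with ⟨c, hc, hbc⟩
    rw [List.eq_of_mem_replicate hbc]
    exact hk c hc

lemma perm_expand_filter (n : Int → Nat) (p : Int → Bool) (l : List Int)
    (h : ∀ k ∈ l, p k = false → n k = 0) :
    (pvExpand n (l.filter p)).Perm (pvExpand n l) := by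
  induction l with
  | nil => simp [pvExpand]
  | cons k ks ih =>
    by_cases hp : p k = true
    · simpa [pvExpand, List.filter_cons, hp] using
        (List.Perm.append_left _ (ih (fun a ha hf => h a (List.mem_cons_of_mem _ ha) hf)))
    · have h0 : n k = 0 := h k (List.mem_cons_self) (by simpa using hp)
      simpa [pvExpand, List.filter_cons, hp, h0] using
        ih (fun a ha hf => h a (List.mem_cons_of_mem _ ha) hf)

lemma sorted_asc_expand (n : Int → Nat) (p : Int → Bool) (ks : List Int)
    (h0 : ∀ k ∈ ks, p k = false → n k = 0) :
    PySem.List.sorted (pvExpand n ks) (fun x => x) false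
      = pvExpand n (PySem.List.sorted (ks.filter p) (fun x => x) false) := by
  apply PySem.List.sorted_id_eq_of_perm_of_pairwise
  · exact ((PySem.List.sorted_perm _ _ _).flatMap (fun a _ => List.Perm.refl _)).trans
      (perm_expand_filter n p ks h0)
  · exact pairwise_expand (fun x => le_refl x) n _
      (by simpa using PySem.List.sorted_pairwise (ks.filter p) (fun x : Int => x))

lemma sorted_desc_expand (n : Int → Nat) (p : Int → Bool) (ks : List Int)
    (h0 : ∀ k ∈ ks, p k = false → n k = 0) :
    PySem.List.sorted (pvExpand n ks) (fun x => x) true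
      = pvExpand n (PySem.List.sorted (ks.filter p) (fun x => x) true) := by
  have hperm : (PySem.List.sorted (pvExpand n ks) (fun x => x) true).Perm
      (pvExpand n (PySem.List.sorted (ks.filter p) (fun x => x) true)) := by
    refine (PySem.List.sorted_perm _ _ _).trans ?_
    refine ((perm_expand_filter n p ks h0).symm).trans ?_
    exact (List.Perm.flatMap (PySem.List.sorted_perm (ks.filter p) (fun x => x) true)
      (fun a _ => List.Perm.refl _)).symm
  refine List.Perm.eq_of_pairwise (le := fun a b : Int => b ≤ a) ?_ ?_ ?_ hperm
  · intro a b _ _ h1 h2; omega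
  · exact PySem.List.sorted_pairwise_rev (pvExpand n ks) (fun x : Int => x)
  · exact pairwise_expand (R := fun a b : Int => b ≤ a) (fun x => le_refl x) n _
      (PySem.List.sorted_pairwise_rev (ks.filter p) (fun x : Int => x))

lemma costFold_eq_zipWith (ea eb : List Int) (cap : Int) (hlen : ea.length ≤ eb.length) :
    (PySem.List.pyRange 0 (PySem.List.len ea) 1).foldl
        (fun cost i => cost + min (min (PySem.List.pyGetD ea i 0) (PySem.List.pyGetD eb i 0)) cap) 0
      = (List.zipWith (fun x y => min (min x y) cap) ea eb).sum := by
  rw [PySem.List.foldl_add (g := fun i => min (min (PySem.List.pyGetD ea i 0) (PySem.List.pyGetD eb i 0)) cap)]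
  rw [zero_add]
  congr 1
  apply List.ext_getElem
  · simp [PySem.List.length_pyRange_one, PySem.List.len_eq]
    omega
  · intro i h1 h2
    simp only [List.getElem_map, PySem.List.len_eq, PySem.List.getElem_pyRange_one, zero_add]
    have hi : i < ea.length := by
      simpa [PySem.List.length_pyRange_one, PySem.List.len_eq] using h1
    rw [List.getElem_zipWith]
    rw [PySem.List.pyGetD_natCast, PySem.List.pyGetD_natCast]
    rw [List.getD_eq_getElem ea 0 hi, List.getD_eq_getElem eb 0 (lt_of_lt_of_le hi hlen)]

lemma zip_rep_sum (f : Int → Int → Int) (m : Nat) (a b : Int) :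
    (List.zipWith f (List.replicate m a) (List.replicate m b)).sum = (m : Int) * f a b := by
  induction m with
  | zero => simp
  | succ n ih => simp [List.replicate_succ]; ring

lemma merge_eq_zipWith_aux (cap : Int) (N : Nat) :
    ∀ asc desc : List (Int × Int), asc.length + desc.length ≤ N →
    ∀ cost : Int, (∀ p ∈ asc, 0 < p.2) → (∀ p ∈ desc, 0 < p.2) →
    solveMerge cap asc desc cost
      = cost + (List.zipWith (fun x y => min (min x y) cap)
          (asc.flatMap (fun p => List.replicate p.2.toNat p.1))
          (desc.flatMap (fun p => List.replicate p.2.toNat p.1))).sum := by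
  induction N with
  | zero =>
    intro asc desc hN cost ha hb
    have h1 : asc = [] := by cases asc <;> simp_all
    subst h1; simp [solveMerge]
  | succ N ih =>
    rintro (_ | ⟨⟨ka, ca⟩, as'⟩) desc hN cost ha hb
    · simp [solveMerge]
    rcases desc with _ | ⟨⟨kb, cb⟩, bs'⟩
    · simp [solveMerge]
    have hca : 0 < ca := ha (ka, ca) List.mem_cons_self
    have hcb : 0 < cb := hb (kb, cb) List.mem_cons_self
    have ha' : ∀ p ∈ as', 0 < p.2 := fun p hp => ha p (List.mem_cons_of_mem _ hp)
    have hb' : ∀ p ∈ bs', 0 < p.2 := fun p hp => hb p (List.mem_cons_of_mem _ hp)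
    rw [solveMerge]
    simp only [List.flatMap_cons]
    set t := min ca cb with htdef
    have ht : 0 < t := lt_min hca hcb
    have hta : t ≤ ca := min_le_left _ _
    have htb : t ≤ cb := min_le_right _ _
    have hsa : List.replicate ca.toNat ka
        = List.replicate t.toNat ka ++ List.replicate (ca - t).toNat ka := by
      rw [← List.replicate_add]; congr 1; omega
    have hsb : List.replicate cb.toNat kb
        = List.replicate t.toNat kb ++ List.replicate (cb - t).toNat kb := by
      rw [← List.replicate_add]; congr 1; omega
    have hzip : (List.zipWith (fun x y => min (min x y) cap)
          (List.replicate ca.toNat ka ++ as'.flatMap (fun p => List.replicate p.2.toNat p.1))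
          (List.replicate cb.toNat kb ++ bs'.flatMap (fun p => List.replicate p.2.toNat p.1))).sum
        = t * min (min ka kb) cap
          + (List.zipWith (fun x y => min (min x y) cap)
              (List.replicate (ca - t).toNat ka ++ as'.flatMap (fun p => List.replicate p.2.toNat p.1))
              (List.replicate (cb - t).toNat kb ++ bs'.flatMap (fun p => List.replicate p.2.toNat p.1))).sum := by
      rw [hsa, hsb, List.append_assoc, List.append_assoc,
        List.zipWith_append (by simp), List.sum_append, zip_rep_sum]
      congr 2
      omega
    split_ifs with h1 h2
    · -- ca = t and cb = t
      rw [beq_iff_eq] at h1 h2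
      rw [ih as' bs' (by simp at hN ⊢; omega) _ ha' hb']
      rw [hzip]
      have e1 : (ca - t).toNat = 0 := by omega
      have e2 : (cb - t).toNat = 0 := by omega
      simp [e1, e2]
      ring
    · -- ca = t, cb > t
      rw [beq_iff_eq] at h1
      rw [beq_iff_eq] at h2
      rw [ih as' ((kb, cb - t) :: bs') (by simp at hN ⊢; omega) _ ha'
        (by
          intro p hp
          rcases List.mem_cons.1 hp with h | h
          · simp [h]; omega
          · exact hb' p h)]
      rw [hzip]
      have e1 : (ca - t).toNat = 0 := by omega
      simp [e1, List.flatMap_cons]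
      ring
    · -- ca > t, so t = cb
      rw [beq_iff_eq] at h1
      have h3 : t = cb := by omega
      rw [ih ((ka, ca - t) :: as') bs' (by simp at hN ⊢; omega) _
        (by
          intro p hp
          rcases List.mem_cons.1 hp with h | h
          · simp [h]; omega
          · exact ha' p h) hb']
      rw [hzip]
      have e2 : (cb - t).toNat = 0 := by omega
      simp [e2, List.flatMap_cons]
      ring

lemma merge_eq_zipWith (cap : Int) (asc desc : List (Int × Int)) (cost : Int)
    (ha : ∀ p ∈ asc, 0 < p.2) (hb : ∀ p ∈ desc, 0 < p.2) :
    solveMerge cap asc desc cost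
      = cost + (List.zipWith (fun x y => min (min x y) cap)
          (asc.flatMap (fun p => List.replicate p.2.toNat p.1))
          (desc.flatMap (fun p => List.replicate p.2.toNat p.1))).sum :=
  merge_eq_zipWith_aux cap (asc.length + desc.length) asc desc le_rfl cost ha hb

lemma length_expand (n : Int → Nat) (ks : List Int) :
    (pvExpand n ks).length = (ks.map n).sum := by
  simp [pvExpand, List.length_flatMap]

-- ===== VERDICT (by name: the statement is the Claim_ definition above) =====
lemma flatMap_congr_mem {α β : Type} (l : List α) (f g : α → List β)
    (h : ∀ a ∈ l, f a = g a) : l.flatMap f = l.flatMap g := by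
  induction l with
  | nil => rfl
  | cons x xs ih =>
    simp only [List.flatMap_cons, h x List.mem_cons_self,
      ih (fun a ha => h a (List.mem_cons_of_mem _ ha))]

theorem solve_spec : Claim_equal_solve := by
  intro A B _ hpre
  unfold Spec_solve
  simp only [solve, solve_alt]
  unfold Pre_solve at hpre
  set dA := PySem.Dict.ofList A with hdA
  set dB := PySem.Dict.ofList B with hdB
  set ks := PySem.Set.union (PySem.Set.ofList (PySem.Dict.keys dA))
      (PySem.Set.ofList (PySem.Dict.keys dB)) with hks
  have hnd : ks.Nodup := PySem.Set.nodup_union _ _ (PySem.Set.nodup_ofList _)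
  have hmem : ∀ k ∈ ks, dA.contains k = true ∨ dB.contains k = true := by
    intro k hk
    rw [hks, PySem.Set.mem_union, PySem.Set.mem_ofList, PySem.Set.mem_ofList] at hk
    rcases hk with h | h
    · exact Or.inl ((PySem.Dict.contains_iff_mem_keys _ _).2 h)
    · exact Or.inr ((PySem.Dict.contains_iff_mem_keys _ _).2 h)
  rw [goA_char dA dB ks hmem, goB_char dA dB ks hnd _ _
    (fun k _ => PySem.Dict.contains_empty k) (fun k _ => PySem.Dict.contains_empty k)]
  by_cases hall : ∀ k ∈ ks, pvOk dA dB k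
  case neg => rw [if_neg hall, if_neg hall]
  rw [if_pos hall, if_pos hall]
  simp only [List.nil_append]
  have hsum : (ks.map (pvCntA dA dB)).sum ≤ (ks.map (pvCntB dA dB)).sum := by
    rcases hpre with h | h
    · rcases h with ⟨k, hk, hbad⟩; exact absurd (hall k hk) hbad
    · exact h.2.2
  have hempty : (PySem.Dict.empty : PySem.Dict Int Int).items = [] := rfl
  have h0A : ∀ k ∈ ks, pvSelA dA dB k = false → pvCntA dA dB k = 0 := by
    intro k _ hsel
    rw [pvSelA, Bool.and_eq_false_iff] at hsel
    rcases hsel with h | h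
    · rw [pvCntA, h]; rfl
    · rw [pvCntA]
      split_ifs with hc
      · exact fd2_nonpos (by simpa using h)
      · rfl
  have h0B : ∀ k ∈ ks, pvSelB dA dB k = false → pvCntB dA dB k = 0 := by
    intro k _ hsel
    rw [pvSelB, Bool.and_eq_false_iff] at hsel
    rcases hsel with h | h
    · rw [pvCntB, h]; rfl
    · rw [pvCntB]
      split_ifs with hc
      · exact fd2_nonpos (by simpa using h)
      · rfl
  -- the run association lists built by B's loop
  set itemsA := (ks.filter (pvSelA dA dB)).map
      (fun k => (k, PySem.Int.floordiv (dA.getD k 0 - dB.getD k 0) 2)) with hitemsA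
  set itemsB := (ks.filter (pvSelB dA dB)).map
      (fun k => (k, PySem.Int.floordiv (dB.getD k 0 - dA.getD k 0) 2)) with hitemsB
  have hkeysA : (PySem.Dict.mk ([] ++ itemsA)).keys = ks.filter (pvSelA dA dB) := by
    rw [List.nil_append, PySem.Dict.keys_mk, hitemsA, List.map_map]
    simp [Function.comp_def]
  have hkeysB : (PySem.Dict.mk ([] ++ itemsB)).keys = ks.filter (pvSelB dA dB) := by
    rw [List.nil_append, PySem.Dict.keys_mk, hitemsB, List.map_map]
    simp [Function.comp_def]
  simp only [hempty]
  have hndkA : ({ items := [] ++ itemsA } : PySem.Dict Int Int).keys.Nodup := by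
    rw [hkeysA]; exact hnd.filter _
  have hndkB : ({ items := [] ++ itemsB } : PySem.Dict Int Int).keys.Nodup := by
    rw [hkeysB]; exact hnd.filter _
  have hasc : (PySem.List.sorted ({ items := [] ++ itemsA } : PySem.Dict Int Int).keys
        (fun x => x)).map (fun k => (k, ({ items := [] ++ itemsA } : PySem.Dict Int Int).getD k 0))
      = (PySem.List.sorted (ks.filter (pvSelA dA dB)) (fun x => x)).map
          (fun k => (k, PySem.Int.floordiv (dA.getD k 0 - dB.getD k 0) 2)) := by
    rw [hkeysA]
    apply List.map_congr_left
    intro k hk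
    have hkf : k ∈ ks.filter (pvSelA dA dB) := (PySem.List.mem_sorted _ _ _ _).1 hk
    congr 1
    refine PySem.Dict.getD_of_mem_items _ ?_ hndkA 0
    rw [List.nil_append, hitemsA]
    exact List.mem_map.2 ⟨k, hkf, rfl⟩
  have hdesc : (PySem.List.sorted ({ items := [] ++ itemsB } : PySem.Dict Int Int).keys
        (fun x => x) true).map (fun k => (k, ({ items := [] ++ itemsB } : PySem.Dict Int Int).getD k 0))
      = (PySem.List.sorted (ks.filter (pvSelB dA dB)) (fun x => x) true).map
          (fun k => (k, PySem.Int.floordiv (dB.getD k 0 - dA.getD k 0) 2)) := by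
    rw [hkeysB]
    apply List.map_congr_left
    intro k hk
    have hkf : k ∈ ks.filter (pvSelB dA dB) := (PySem.List.mem_sorted _ _ _ _).1 hk
    congr 1
    refine PySem.Dict.getD_of_mem_items _ ?_ hndkB 0
    rw [List.nil_append, hitemsB]
    exact List.mem_map.2 ⟨k, hkf, rfl⟩
  rw [hasc, hdesc]
  have hposA : ∀ p ∈ (PySem.List.sorted (ks.filter (pvSelA dA dB)) (fun x => x)).map
      (fun k => (k, PySem.Int.floordiv (dA.getD k 0 - dB.getD k 0) 2)), 0 < p.2 := by
    intro p hp
    obtain ⟨k, hk, rfl⟩ := List.mem_map.1 hp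
    have hkf := (PySem.List.mem_sorted _ _ _ _).1 hk
    have hks' := (List.mem_filter.1 hkf).1
    have hsel := (List.mem_filter.1 hkf).2
    rw [pvSelA, Bool.and_eq_true, decide_eq_true_eq] at hsel
    have hdvd : (2 : Int) ∣ dA.getD k 0 - dB.getD k 0 :=
      (PySem.Int.mod_eq_zero_iff_dvd _ _).1 (hall k hks')
    exact (PySem.Int.le_floordiv_iff_mul_le (by omega)).2 (by omega)
  have hposB : ∀ p ∈ (PySem.List.sorted (ks.filter (pvSelB dA dB)) (fun x => x) true).map
      (fun k => (k, PySem.Int.floordiv (dB.getD k 0 - dA.getD k 0) 2)), 0 < p.2 := by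
    intro p hp
    obtain ⟨k, hk, rfl⟩ := List.mem_map.1 hp
    have hkf := (PySem.List.mem_sorted _ _ _ _).1 hk
    have hks' := (List.mem_filter.1 hkf).1
    have hsel := (List.mem_filter.1 hkf).2
    rw [pvSelB, Bool.and_eq_true, decide_eq_true_eq] at hsel
    have hdvd : (2 : Int) ∣ dA.getD k 0 - dB.getD k 0 :=
      (PySem.Int.mod_eq_zero_iff_dvd _ _).1 (hall k hks')
    exact (PySem.Int.le_floordiv_iff_mul_le (by omega)).2 (by omega)
  rw [merge_eq_zipWith _ _ _ _ hposA hposB, zero_add]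
  have hlen : (PySem.List.sorted (pvExpand (pvCntA dA dB) ks) (fun x => x)).length
      ≤ (PySem.List.sorted (pvExpand (pvCntB dA dB) ks) (fun x => x) true).length := by
    rw [PySem.List.length_sorted, PySem.List.length_sorted, length_expand, length_expand]
    exact hsum
  rw [costFold_eq_zipWith _ _ _ hlen]
  rw [sorted_asc_expand (pvCntA dA dB) (pvSelA dA dB) ks h0A,
      sorted_desc_expand (pvCntB dA dB) (pvSelB dA dB) ks h0B]
  have hfmA : ((PySem.List.sorted (ks.filter (pvSelA dA dB)) (fun x => x)).map
        (fun k => (k, PySem.Int.floordiv (dA.getD k 0 - dB.getD k 0) 2))).flatMap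
        (fun p => List.replicate p.2.toNat p.1)
      = pvExpand (pvCntA dA dB) (PySem.List.sorted (ks.filter (pvSelA dA dB)) (fun x => x)) := by
    rw [List.flatMap_map, pvExpand]
    apply flatMap_congr_mem
    intro k hk
    have hkf := (PySem.List.mem_sorted _ _ _ _).1 hk
    have hsel := (List.mem_filter.1 hkf).2
    rw [pvSelA, Bool.and_eq_true] at hsel
    simp only [pvCntA, hsel.1, if_pos]
  have hfmB : ((PySem.List.sorted (ks.filter (pvSelB dA dB)) (fun x => x) true).map
        (fun k => (k, PySem.Int.floordiv (dB.getD k 0 - dA.getD k 0) 2))).flatMap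
        (fun p => List.replicate p.2.toNat p.1)
      = pvExpand (pvCntB dA dB) (PySem.List.sorted (ks.filter (pvSelB dA dB)) (fun x => x) true) := by
    rw [List.flatMap_map, pvExpand]
    apply flatMap_congr_mem
    intro k hk
    have hkf := (PySem.List.mem_sorted _ _ _ _).1 hk
    have hsel := (List.mem_filter.1 hkf).2
    rw [pvSelB, Bool.and_eq_true] at hsel
    simp only [pvCntB, hsel.1, if_pos]
  rw [hfmA, hfmB]
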